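-- pv_equiv track=rewrite | github.com/felicia9820/crimtech-comp-f20 | python/rm_smallest.py | rm_smallest
-- ===== SOURCE A (Python) =====
-- def rm_smallest(d):
--     # Your code here!
--     if not bool(d):
--         return d
--     else:
--         min_value = min(d.values())
--         key_min = [key for key in d.keys() if d[key] == min_value]
--         d.pop(key_min[0])
--         return d
-- ===== SOURCE B (Python) =====
-- def rm_smallest(d):
--     # Single-pass scan tracking the first item with minimal value (in place, like A).
--     if not d:
--         return d
--     items = iter(d.items())
--     best_key, best_val = next(items)
--     for k, v in items:
--         if v < best_val:
--             best_key, best_val = k, v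
--     d.pop(best_key)
--     return d
-- ===== Notes on version B (the rewrite author's own statement) =====
-- stated objective: alternative
-- what changed: Replaces the three passes (min over values, comprehension collecting all keys achieving it, index into that list) with one pass over d.items() keeping the first strictly-minimal item, then pops that key.
import Mathlib
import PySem

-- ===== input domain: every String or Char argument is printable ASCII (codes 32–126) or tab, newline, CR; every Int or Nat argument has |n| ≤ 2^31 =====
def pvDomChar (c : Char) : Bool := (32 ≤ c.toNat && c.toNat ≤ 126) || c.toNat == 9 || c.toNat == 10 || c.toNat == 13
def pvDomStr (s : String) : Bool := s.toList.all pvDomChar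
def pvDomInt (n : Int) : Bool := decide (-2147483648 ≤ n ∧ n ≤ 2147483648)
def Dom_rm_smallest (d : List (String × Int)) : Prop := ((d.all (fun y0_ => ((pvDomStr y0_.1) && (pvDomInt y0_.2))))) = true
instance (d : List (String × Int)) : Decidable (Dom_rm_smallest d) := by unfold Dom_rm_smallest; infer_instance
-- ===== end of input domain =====

-- B changes the decomposition: one pass over the items keeping the first strictly-minimal
-- item, instead of A's min over values + key comprehension + first index (objective: alternative).
-- Both Pythons mutate the dict in place (pop); the equivalence proved here is about the return value.

-- ===== PORT A =====
-- d.pop(k): remove the (unique) entry with key k from the association list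
def popKey (d : List (String × Int)) (k : String) : List (String × Int) :=
  d.eraseP (fun p => p.1 == k)

def rm_smallest (d : List (String × Int)) : List (String × Int) :=
  if d.isEmpty then d
  else
    match PySem.List.min? (d.map (fun p => p.2)) (fun x => x) with
    | none => d  -- unreachable: d is nonempty
    | some m =>
      let key_min := (d.map (fun p => p.1)).filter
        (fun k => ((d.find? (fun r => r.1 == k)).map (fun r => r.2)) == some m)
      match key_min with
      | [] => d  -- unreachable: the minimum is attained by some key
      | k :: _ => popKey d k

-- ===== PORT B =====
def rm_smallest_alt (d : List (String × Int)) : List (String × Int) :=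
  match d with
  | [] => []
  | p :: rest =>
    popKey d (rest.foldl (fun b q => if q.2 < b.2 then q else b) p).1

-- ===== PRECONDITION & SPEC =====
-- Pre_ excludes association lists with duplicate keys: they do not represent any Python
-- dict (dict construction collapses duplicates), so A's behaviour there is not defined.
def Pre_rm_smallest (d : List (String × Int)) : Prop := (d.map Prod.fst).Nodup
instance (d : List (String × Int)) : Decidable (Pre_rm_smallest d) := by
  unfold Pre_rm_smallest; infer_instance
def pvWitness_rm_smallest : (List (String × Int)) := [("a", 3), ("b", 1), ("c", 2)]

def Spec_rm_smallest (d : List (String × Int)) (out : List (String × Int)) : Prop := out = rm_smallest_alt d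
instance (d : List (String × Int)) (out : List (String × Int)) : Decidable (Spec_rm_smallest d out) := by unfold Spec_rm_smallest; infer_instance

-- ===== CLAIM (what is proved, stated in full; the proofs are below) =====
def Claim_equal_rm_smallest : Prop := ∀ (d : List (String × Int)), Dom_rm_smallest d → Pre_rm_smallest d → Spec_rm_smallest d (rm_smallest d)

-- ===== LEMMAS AND PROOFS =====

-- find? is the head of filter
theorem find?_eq_head?_filter {α : Type} (p : α → Bool) (l : List α) :
    l.find? p = (l.filter p).head? := by
  induction l with
  | nil => rfl
  | cons x t ih =>
    by_cases h : p x
    · rw [List.find?_cons_of_pos h, List.filter_cons_of_pos h, List.head?_cons]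
    · rw [List.find?_cons_of_neg h, List.filter_cons_of_neg h, ih]

-- with nodup keys, first-match lookup of q.1 finds q itself
theorem find?_key_self (d : List (String × Int)) (q : String × Int)
    (hnd : (d.map Prod.fst).Nodup) (hq : q ∈ d) :
    d.find? (fun r => r.1 == q.1) = some q := by
  induction d with
  | nil => cases hq
  | cons r t ih =>
    simp only [List.map_cons, List.nodup_cons] at hnd
    rcases List.mem_cons.mp hq with h | h
    · subst h; simp
    · have hne : r.1 ≠ q.1 := by
        intro he; exact hnd.1 (he ▸ List.mem_map_of_mem h)
      simp [hne, ih hnd.2 h]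

-- if nothing in t beats p, the strict-minimum fold keeps p
theorem foldl_step_const (t : List (String × Int)) (p : String × Int)
    (h : ∀ q ∈ t, ¬ q.2 < p.2) :
    t.foldl (fun b q => if q.2 < b.2 then q else b) p = p := by
  induction t with
  | nil => rfl
  | cons a s ih =>
    rw [List.foldl_cons, if_neg (h a (List.mem_cons_self))]
    exact ih (fun q hq => h q (List.mem_cons_of_mem a hq))

-- the single-pass fold returns the first item whose value is the running minimum
theorem best_char (t : List (String × Int)) (p : String × Int) :
    (p :: t).find? (fun q => q.2 == (t.map (fun r => r.2)).foldl min p.2)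
      = some (t.foldl (fun b q => if q.2 < b.2 then q else b) p) := by
  induction t generalizing p with
  | nil => simp
  | cons q t ih =>
    simp only [List.map_cons, List.foldl_cons]
    by_cases h : q.2 < p.2
    · have hm : min p.2 q.2 = q.2 := by omega
      rw [hm, if_pos h]
      have hM := (PySem.List.foldl_min_le (t.map (fun r => r.2)) q.2).1
      have hp : ¬ ((fun z : String × Int => z.2 == (t.map (fun r => r.2)).foldl min q.2) p = true) := by
        simp; omega
      rw [List.find?_cons_of_neg (l := q :: t) hp]
      exact ih q
    · have hm : min p.2 q.2 = p.2 := by omega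
      rw [hm, if_neg h]
      have hM := PySem.List.foldl_min_le (t.map (fun r => r.2)) p.2
      by_cases hp : p.2 = (t.map (fun r => r.2)).foldl min p.2
      · have hpt : (fun z : String × Int => z.2 == (t.map (fun r => r.2)).foldl min p.2) p = true := by
          simp [← hp]
        rw [List.find?_cons_of_pos (l := q :: t) hpt]
        have hall : ∀ q ∈ t, ¬ q.2 < p.2 := by
          intro r hr
          have := hM.2 r.2 (List.mem_map_of_mem hr)
          omega
      
        rw [foldl_step_const t p hall]
      · have hpf : ¬ ((fun z : String × Int => z.2 == (t.map (fun r => r.2)).foldl min p.2) p = true) := by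
          simp; omega
        have hqf : ¬ ((fun z : String × Int => z.2 == (t.map (fun r => r.2)).foldl min p.2) q = true) := by
          have := hM.1; simp; omega
        rw [List.find?_cons_of_neg (l := q :: t) hpf, List.find?_cons_of_neg (l := t) hqf]
        have ih' := ih p
        rw [List.find?_cons_of_neg (l := t) hpf] at ih'
        exact ih'

-- with nodup keys, A's key filter is the keys of the value filter
theorem filter_keys (d : List (String × Int)) (m : Int)
    (hnd : (d.map Prod.fst).Nodup) :
    (d.map (fun p => p.1)).filter
        (fun k => ((d.find? (fun r => r.1 == k)).map (fun r => r.2)) == some m)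
      = (d.filter (fun q => q.2 == m)).map (fun q => q.1) := by
  rw [List.filter_map]
  congr 1
  apply List.filter_congr
  intro q hq
  rw [Function.comp_apply, find?_key_self d q hnd hq]
  simp

theorem rm_smallest_eq (d : List (String × Int)) (hnd : (d.map Prod.fst).Nodup) :
    rm_smallest d = rm_smallest_alt d := by
  cases d with
  | nil => rfl
  | cons p rest =>
    have hmin : PySem.List.min? ((p :: rest).map (fun z => z.2)) (fun x => x)
        = some ((rest.map (fun r => r.2)).foldl min p.2) := by
      rw [List.map_cons, PySem.List.min?_id_cons]
    set m := (rest.map (fun r => r.2)).foldl min p.2 with hm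
    set best := rest.foldl (fun b q => if q.2 < b.2 then q else b) p with hb
    have hhead : (((p :: rest).filter (fun q => q.2 == m)).map (fun q => q.1)).head?
        = some best.1 := by
      rw [List.head?_map, ← find?_eq_head?_filter, best_char]; rfl
    simp only [rm_smallest, rm_smallest_alt, List.isEmpty_cons, Bool.false_eq_true,
      if_false, hmin]
    rw [filter_keys _ _ hnd]
    cases hk : ((p :: rest).filter (fun q => q.2 == m)).map (fun q => q.1) with
    | nil => rw [hk] at hhead; cases hhead
    | cons k ks =>
      rw [hk] at hhead
      simp only [List.head?_cons, Option.some.injEq] at hhead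
      rw [hhead]

-- ===== VERDICT (by name: the statement is the Claim_ definition above) =====
theorem rm_smallest_spec : Claim_equal_rm_smallest := by
  intro d _ hpre
  unfold Spec_rm_smallest
  exact rm_smallest_eq d hpre
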